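-- pv_equiv track=rewrite | github.com/xDuckxc/react-webgame-ecom | game-ecommerce/src/app/api.py | build_genre_index
-- ===== SOURCE A (Python) =====
-- from typing import Dict, List, Optional
-- from collections import defaultdict
--
-- ALIAS: Dict[str, str] = {
--     "Battle Royal": "Battle Royale",  # common typo -> canonical
--     " MMORPG": "MMORPG",  # leading space -> stripped
-- }
--
-- def canon_genre(raw):
--     if raw is None:
--         return None
--     s = str(raw)
--     # 1) apply alias if exact key matches (before strip, to catch leading space case)
--     if s in ALIAS:
--         s = ALIAS[s]
--     # 2) trim leftover surrounding whitespace
--     s = s.strip()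
--     return s
--
-- def build_genre_index(games):
--     """Return mapping: canonical_genre -> list of unique games (deduped by id)."""
--     buckets = defaultdict(list)
--     seen_per_genre = defaultdict(set)
--     for g in games:
--         cg = canon_genre(g.get("genre"))
--         gid = g.get("id")
--         if cg is None or gid is None:
--             continue
--         if gid in seen_per_genre[cg]:
--             continue  # skip duplicates within same genre
--         seen_per_genre[cg].add(gid)
--         buckets[cg].append(g)
--     return buckets
-- ===== SOURCE B (Python) =====
-- from typing import Dict, List, Optional
-- from collections import defaultdict
--
-- ALIAS: Dict[str, str] = {
--     "Battle Royal": "Battle Royale",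
--     " MMORPG": "MMORPG",
-- }
--
-- def canon_genre(raw):
--     if raw is None:
--         return None
--     s = str(raw)
--     if s in ALIAS:
--         s = ALIAS[s]
--     s = s.strip()
--     return s
--
-- def build_genre_index(games):
--     """Return mapping: canonical_genre -> list of unique games (deduped by id).
--
--     Staged, genre-major version: normalize once into rows, list the genres in
--     first-appearance order, then build each genre's deduped list by its own scan.
--     """
--     rows = []
--     for g in games:
--         cg = canon_genre(g.get("genre"))
--         gid = g.get("id")
--         if cg is not None and gid is not None:
--             rows.append((cg, gid, g))
--     genres = []
--     for cg, _, _ in rows: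
--         if cg not in genres:
--             genres.append(cg)
--     result = defaultdict(list)
--     for cg in genres:
--         ids = []
--         picked = []
--         for c, gid, g in rows:
--             if c == cg and gid not in ids:
--                 ids.append(gid)
--                 picked.append(g)
--         result[cg] = picked
--     return result
-- ===== Notes on version B (the rewrite author's own statement) =====
-- stated objective: alternative
-- what changed: Replaces A's single pass with parallel per-genre buckets and seen-sets by a staged genre-major pipeline: normalize all records into rows, list genres in first-appearance order, then an outer loop over genres with an inner rescan of the rows collecting each genre's id-deduped games.
import Mathlib
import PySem

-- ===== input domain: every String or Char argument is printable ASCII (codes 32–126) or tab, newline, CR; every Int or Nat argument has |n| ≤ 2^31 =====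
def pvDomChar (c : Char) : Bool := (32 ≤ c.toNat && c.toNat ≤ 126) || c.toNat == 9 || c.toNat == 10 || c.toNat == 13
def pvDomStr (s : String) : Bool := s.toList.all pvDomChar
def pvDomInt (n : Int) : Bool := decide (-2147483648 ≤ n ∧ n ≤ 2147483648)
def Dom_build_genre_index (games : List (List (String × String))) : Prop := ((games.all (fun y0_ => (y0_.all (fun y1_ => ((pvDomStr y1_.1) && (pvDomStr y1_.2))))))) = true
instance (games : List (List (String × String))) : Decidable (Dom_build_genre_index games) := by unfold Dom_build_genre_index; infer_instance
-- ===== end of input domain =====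

-- B replaces A's single pass (parallel buckets/seen-set dicts) by a staged genre-major pipeline:
-- rows, then genres in first-appearance order, then one rescan of the rows per genre (alternative; not faster).

-- ===== PORT A =====
-- shared helper: Python's canon_genre (ALIAS lookup by its two literal keys, then strip)
def canonGenre : Option String → Option String
  | none => none
  | some raw =>
    let s := if raw = "Battle Royal" then "Battle Royale"
             else if raw = " MMORPG" then "MMORPG" else raw
    some (PySem.Str.strip s)

-- A's loop body: buckets(list)/seen(set) pair, skip duplicates, append otherwise
def stepA (st : PySem.Dict String (List (List (String × String))) × PySem.Dict String (PySem.Set String))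
    (g : List (String × String)) :
    PySem.Dict String (List (List (String × String))) × PySem.Dict String (PySem.Set String) :=
  match canonGenre ((PySem.Dict.mk g).get? "genre"), (PySem.Dict.mk g).get? "id" with
  | some cg, some gid =>
    if PySem.Set.contains (st.2.getD cg []) gid then st
    else (st.1.modify cg [] (fun l => l ++ [g]),
          st.2.modify cg [] (fun s => PySem.Set.add s gid))
  | _, _ => st

def build_genre_index (games : List (List (String × String))) :
    List (String × List (List (String × String))) :=
  (games.foldl stepA (PySem.Dict.empty, PySem.Dict.empty)).1.items

-- ===== PORT B =====
-- B's first loop: normalize each game to a (canonical genre, id, game) row, dropping incomplete ones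
def stepRow (acc : List (String × String × List (String × String))) (g : List (String × String)) :
    List (String × String × List (String × String)) :=
  match canonGenre ((PySem.Dict.mk g).get? "genre"), (PySem.Dict.mk g).get? "id" with
  | some cg, some gid => acc ++ [(cg, gid, g)]
  | _, _ => acc

-- B's second loop: the genres in first-appearance order ('if cg not in genres: genres.append(cg)')
def genresOf (rws : List (String × String × List (String × String))) : PySem.Set String :=
  rws.foldl (fun acc r => PySem.Set.add acc r.1) []

-- B's inner loop for one genre: (ids, picked) accumulator over the rows
def collect (cg : String) (rws : List (String × String × List (String × String))) :
    PySem.Set String × List (List (String × String)) :=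
  rws.foldl (fun st r =>
    if r.1 == cg && !(PySem.Set.contains st.1 r.2.1) then
      (PySem.Set.add st.1 r.2.1, st.2 ++ [r.2.2])
    else st) ([], [])

def build_genre_index_alt (games : List (List (String × String))) :
    List (String × List (List (String × String))) :=
  let rws := games.foldl stepRow []
  let genres := genresOf rws
  (genres.foldl (fun d cg => d.insert cg (collect cg rws).2) PySem.Dict.empty).items

-- ===== PRECONDITION & SPEC =====
def Spec_build_genre_index (games : List (List (String × String))) (out : List (String × List (List (String × String)))) : Prop := out = build_genre_index_alt games
instance (games : List (List (String × String))) (out : List (String × List (List (String × String)))) : Decidable (Spec_build_genre_index games out) := by unfold Spec_build_genre_index; infer_instance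

-- ===== CLAIM (what is proved, stated in full; the proofs are below) =====
def Claim_equal_build_genre_index : Prop := ∀ (games : List (List (String × String))), Dom_build_genre_index games → Spec_build_genre_index games (build_genre_index games)

-- ===== LEMMAS AND PROOFS =====

theorem genresOf_eq_ofList (rws : List (String × String × List (String × String))) :
    genresOf rws = PySem.Set.ofList (rws.map (·.1)) := by
  rw [genresOf, ← PySem.Set.update_map_eq_foldl_add, PySem.Set.update_nil_left]

theorem collect_of_no_match (cg : String) (rws : List (String × String × List (String × String)))
    (h : ∀ r ∈ rws, r.1 ≠ cg) : collect cg rws = ([], []) := by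
  have key : ∀ (st : PySem.Set String × List (List (String × String))),
      rws.foldl (fun st r =>
        if r.1 == cg && !(PySem.Set.contains st.1 r.2.1) then
          (PySem.Set.add st.1 r.2.1, st.2 ++ [r.2.2])
        else st) st = st := by
    induction rws with
    | nil => intro st; rfl
    | cons r rest ih =>
      intro st
      have hr : (r.1 == cg) = false := by
        simpa using h r (List.mem_cons_self ..)
      rw [List.foldl_cons, hr]
      simp only [Bool.false_and, Bool.false_eq_true, if_false]
      exact ih (fun r hr => h r (List.mem_cons_of_mem _ hr)) st
  exact key ([], [])

theorem mem_genresOf {cg : String} {rws : List (String × String × List (String × String))} :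
    cg ∈ genresOf rws ↔ ∃ r ∈ rws, r.1 = cg := by
  rw [genresOf_eq_ofList, PySem.Set.mem_ofList, List.mem_map]

-- lookup in a dict whose items are a map over keys
theorem get?_items_map (genres : List String) (F : String → List (List (String × String))) (k : String) :
    (PySem.Dict.mk (genres.map (fun c => (c, F c)))).get? k
      = if k ∈ genres then some (F k) else none := by
  induction genres with
  | nil => rfl
  | cons c rest ih =>
    rw [List.map_cons, PySem.Dict.get?_mk_cons]
    by_cases hc : (c == k)
    · have : c = k := by simpa using hc
      simp [this]
    · have hne : ¬ k = c := by intro h; exact hc (by simp [h])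
      simp [hc, ih, hne]

-- the invariant tying A's (buckets, seen) state after some prefix to B's staged functions of the rows so far
def GInv (st : PySem.Dict String (List (List (String × String))) × PySem.Dict String (PySem.Set String))
    (rws : List (String × String × List (String × String))) : Prop :=
  st.1.items = (genresOf rws).map (fun cg => (cg, (collect cg rws).2)) ∧
  ∀ cg, st.2.getD cg [] = (collect cg rws).1

theorem inv_step (st : PySem.Dict String (List (List (String × String))) × PySem.Dict String (PySem.Set String))
    (rws : List (String × String × List (String × String))) (g : List (String × String))
    (h : GInv st rws) : GInv (stepA st g) (stepRow rws g) := by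
  obtain ⟨h1, h2⟩ := h
  unfold stepA stepRow
  cases hcg : canonGenre ((PySem.Dict.mk g).get? "genre") with
  | none => cases (PySem.Dict.mk g).get? "id" <;> exact ⟨h1, h2⟩
  | some cg =>
    cases hgid : (PySem.Dict.mk g).get? "id" with
    | none => exact ⟨h1, h2⟩
    | some gid =>
      simp only []
      have hids : st.2.getD cg [] = (collect cg rws).1 := h2 cg
      have hgen' : genresOf (rws ++ [(cg, gid, g)]) = PySem.Set.add (genresOf rws) cg := by
        unfold genresOf; rw [List.foldl_append]; rfl
      have hcol' : ∀ c, collect c (rws ++ [(cg, gid, g)]) =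
          (if (cg == c) && !(PySem.Set.contains (collect c rws).1 gid)
           then (PySem.Set.add (collect c rws).1 gid, (collect c rws).2 ++ [g])
           else collect c rws) := by
        intro c; unfold collect; rw [List.foldl_append]; rfl
      cases hdup : PySem.Set.contains (st.2.getD cg []) gid with
      | true =>
        rw [if_pos rfl]
        have hcontains : PySem.Set.contains (collect cg rws).1 gid = true := hids ▸ hdup
        have hmem : gid ∈ (collect cg rws).1 := (PySem.Set.contains_iff _ _).mp hcontains
        have hcgmem : cg ∈ genresOf rws := by
          by_contra hn
          have hno : ∀ r ∈ rws, r.1 ≠ cg := fun r hr he => hn (mem_genresOf.mpr ⟨r, hr, he⟩)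
          rw [collect_of_no_match cg rws hno] at hmem
          simp at hmem
        have hcol_eq : ∀ c, collect c (rws ++ [(cg, gid, g)]) = collect c rws := by
          intro c; rw [hcol' c]
          by_cases hc : (cg == c)
          · have hce : cg = c := eq_of_beq hc
            subst hce
            simp [hmem]
          · simp [hc]
        have hgen_eq : genresOf (rws ++ [(cg, gid, g)]) = genresOf rws := by
          rw [hgen', PySem.Set.add_of_mem hcgmem]
        refine ⟨?_, ?_⟩
        · rw [hgen_eq, h1]
          exact (List.map_congr_left (fun c _ => by rw [hcol_eq c])).symm
        · intro c; rw [hcol_eq c]; exact h2 c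
      | false =>
        rw [if_neg (by simp)]
        have hcontains : PySem.Set.contains (collect cg rws).1 gid = false := hids ▸ hdup
        have hcol'' : ∀ c, collect c (rws ++ [(cg, gid, g)]) =
            (if c = cg then (PySem.Set.add (collect cg rws).1 gid, (collect cg rws).2 ++ [g])
             else collect c rws) := by
          intro c; rw [hcol' c]
          by_cases hc : c = cg
          · subst hc
            have hnm : gid ∉ (collect c rws).1 := by simpa using hcontains
            simp [hnm]
          · have : (cg == c) = false := by simp [Ne.symm hc]
            simp [this, hc]
        have hD : st.1 = PySem.Dict.mk ((genresOf rws).map (fun c => (c, (collect c rws).2))) :=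
          PySem.Dict.ext h1
        have hget : ∀ k, st.1.get? k =
            if k ∈ genresOf rws then some ((collect k rws).2) else none := by
          intro k; rw [hD]; exact get?_items_map _ _ k
        refine ⟨?_, ?_⟩
        · show (st.1.modify cg [] (fun l => l ++ [g])).items = _
          have hmod : st.1.modify cg [] (fun l => l ++ [g])
              = st.1.insert cg (st.1.getD cg [] ++ [g]) := rfl
          rw [hmod, hgen']
          by_cases hcgmem : cg ∈ genresOf rws
          · have hcont : st.1.contains cg = true := by
              rw [PySem.Dict.contains_eq_isSome_get?, hget, if_pos hcgmem]; rfl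
            have hgetD : st.1.getD cg [] = (collect cg rws).2 := by
              rw [PySem.Dict.getD_eq_get?_getD, hget, if_pos hcgmem]; rfl
            rw [PySem.Dict.items_insert_of_contains _ _ hcont, h1, List.map_map,
              PySem.Set.add_of_mem hcgmem]
            apply List.map_congr_left
            intro c _
            by_cases hc : c = cg
            · subst hc
              simp [hcol'' c, hgetD]
            · have hbne : (c == cg) = false := by simp [hc]
              simp [Function.comp, hbne, hcol'' c, hc]
          · have hno : ∀ r ∈ rws, r.1 ≠ cg := fun r hr he => hcgmem (mem_genresOf.mpr ⟨r, hr, he⟩)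
            have hz : collect cg rws = ([], []) := collect_of_no_match cg rws hno
            have hcont : st.1.contains cg = false := by
              rw [PySem.Dict.contains_eq_isSome_get?, hget, if_neg hcgmem]; rfl
            have hgetD : st.1.getD cg [] = [] := PySem.Dict.getD_of_not_contains _ _ hcont
            rw [PySem.Dict.items_insert_of_not_contains _ _ hcont, h1,
              PySem.Set.add_of_not_mem hcgmem, List.map_append]
            refine congrArg₂ _ ?_ ?_
            · apply List.map_congr_left
              intro c hcmem
              have hc : ¬ c = cg := fun he => hcgmem (he ▸ hcmem)
              rw [hcol'' c, if_neg hc]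
            · simp [hcol'', hz, hgetD]
        · intro c
          show (st.2.modify cg [] (fun s => PySem.Set.add s gid)).getD c [] = _
          rw [PySem.Dict.getD_modify, hcol'' c]
          by_cases hc : c = cg
          · rw [if_pos hc, if_pos hc, hids]
          · rw [if_neg hc, if_neg hc]; exact h2 c

theorem inv_fold (games : List (List (String × String)))
    (st : PySem.Dict String (List (List (String × String))) × PySem.Dict String (PySem.Set String))
    (rws : List (String × String × List (String × String))) (h : GInv st rws) :
    GInv (games.foldl stepA st) (games.foldl stepRow rws) := by
  induction games generalizing st rws with
  | nil => exact h
  | cons g rest ih => exact ih _ _ (inv_step st rws g h)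

-- ===== VERDICT (by name: the statement is the Claim_ definition above) =====
theorem build_genre_index_spec : Claim_equal_build_genre_index := by
  intro games _
  unfold Spec_build_genre_index build_genre_index build_genre_index_alt
  have hinv := inv_fold games (PySem.Dict.empty, PySem.Dict.empty) [] ⟨rfl, fun _ => rfl⟩
  rw [hinv.1]
  have hnodup : (genresOf (games.foldl stepRow [])).Nodup := by
    rw [genresOf_eq_ofList]; exact PySem.Set.nodup_ofList _
  have hfresh := PySem.Dict.items_foldl_insert_fresh
      (l := genresOf (games.foldl stepRow [])) (k := fun c => c)
      (v := fun c => (collect c (games.foldl stepRow [])).2) (d := PySem.Dict.empty)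
      (fun _ _ => PySem.Dict.contains_empty _) (by simpa using hnodup)
  exact (hfresh.trans (by simp [PySem.Dict.empty])).symm
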